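-- pv_equiv track=rewrite | github.com/wenprompt/reconengine | src/unified_recon/utils/rule0_config_utils.py | get_active_exchange_groups
-- ===== SOURCE A (Python) =====
-- from typing import Any, Optional
--
-- def get_active_exchange_groups(
--     trades: list[dict[str, Any]], valid_groups: list[int]
-- ) -> set[int]:
--     """Get active exchange groups from trades.
--
--     Args:
--         trades: List of trades
--         valid_groups: List of valid group IDs for the exchange
--
--     Returns:
--         Set of active group IDs
--     """
--     active_groups = set()
--
--     for trade in trades:
--         group = trade.get("exchangeGroupId", trade.get("exchangegroupid", 0))
--         group_id = int(group) if group else 0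
--
--         if group_id in valid_groups:
--             active_groups.add(group_id)
--
--     return active_groups
-- ===== SOURCE B (Python) =====
-- def get_active_exchange_groups(trades, valid_groups):
--     """Divide and conquer: recursively split the trades in half, solve each
--     half independently, and combine the two results with set union; a leaf
--     filters its single trade's normalized group id against the valid set."""
--     valid = set(valid_groups)
--
--     def go(ts):
--         if len(ts) <= 1:
--             if not ts:
--                 return set()
--             g = ts[0].get("exchangeGroupId", ts[0].get("exchangegroupid", 0))
--             gid = int(g) if g else 0
--             return {gid} if gid in valid else set()
--         mid = len(ts) // 2
--         return go(ts[:mid]) | go(ts[mid:])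
--
--     return go(trades)
-- ===== Notes on version B (the rewrite author's own statement) =====
-- stated objective: alternative
-- what changed: Replaces A's single linear pass with a list-membership branch inside the accumulation loop by a divide-and-conquer recursion: the trades list is split in half, each half solved independently, and the two result sets combined with set union; each leaf filters its single trade's normalized id against a prebuilt hash set of valid_groups instead of scanning the valid_groups list.
import Mathlib
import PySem

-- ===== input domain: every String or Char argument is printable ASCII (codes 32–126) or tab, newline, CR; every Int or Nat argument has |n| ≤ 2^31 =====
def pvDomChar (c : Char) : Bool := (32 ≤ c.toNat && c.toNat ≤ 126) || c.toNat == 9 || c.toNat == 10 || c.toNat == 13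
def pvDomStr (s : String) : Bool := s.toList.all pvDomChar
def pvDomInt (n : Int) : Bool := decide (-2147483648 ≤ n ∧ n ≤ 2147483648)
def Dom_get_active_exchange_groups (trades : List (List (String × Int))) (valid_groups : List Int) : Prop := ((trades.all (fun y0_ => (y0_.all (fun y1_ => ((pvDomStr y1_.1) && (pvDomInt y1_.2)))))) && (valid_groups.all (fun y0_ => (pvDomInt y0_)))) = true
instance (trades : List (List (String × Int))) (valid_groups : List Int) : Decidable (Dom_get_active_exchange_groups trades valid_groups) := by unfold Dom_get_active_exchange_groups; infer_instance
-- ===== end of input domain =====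

-- B replaces A's linear filtering fold by a divide-and-conquer recursion (split the
-- trades in half, solve each half, combine with set union); same result, alternative shape.

-- ===== PORT A =====
def get_active_exchange_groups (trades : List (List (String × Int))) (valid_groups : List Int) : List Int :=
  trades.foldl
    (fun active_groups trade =>
      let group := PySem.Dict.getD (PySem.Dict.mk trade) "exchangeGroupId" (PySem.Dict.getD (PySem.Dict.mk trade) "exchangegroupid" 0)
      let group_id := if group ≠ 0 then group else 0
      if valid_groups.contains group_id then PySem.Set.add active_groups group_id
      else active_groups)
    PySem.Set.empty

-- ===== PORT B =====
-- the leaf's extraction: trade.get("exchangeGroupId", trade.get("exchangegroupid", 0)), normalized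
def pvExtract (trade : List (String × Int)) : Int :=
  let g := PySem.Dict.getD (PySem.Dict.mk trade) "exchangeGroupId" (PySem.Dict.getD (PySem.Dict.mk trade) "exchangegroupid" 0)
  if g ≠ 0 then g else 0

-- the inner 'go': ts[:mid] / ts[mid:] with 0 ≤ mid ≤ len are exactly take/drop
def pvGo (valid : PySem.Set Int) (ts : List (List (String × Int))) : List Int :=
  if _h : ts.length ≤ 1 then
    match ts with
    | [] => PySem.Set.empty
    | t :: _ =>
      let gid := pvExtract t
      if PySem.Set.contains valid gid then PySem.Set.add PySem.Set.empty gid else PySem.Set.empty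
  else
    let mid := ts.length / 2
    PySem.Set.union (pvGo valid (ts.take mid)) (pvGo valid (ts.drop mid))
termination_by ts.length
decreasing_by all_goals (simp; omega)

def get_active_exchange_groups_alt (trades : List (List (String × Int))) (valid_groups : List Int) : List Int :=
  let valid := PySem.Set.ofList valid_groups
  pvGo valid trades

-- ===== PRECONDITION & SPEC =====
def Spec_get_active_exchange_groups (trades : List (List (String × Int))) (valid_groups : List Int) (out : List Int) : Prop := out = get_active_exchange_groups_alt trades valid_groups
instance (trades : List (List (String × Int))) (valid_groups : List Int) (out : List Int) : Decidable (Spec_get_active_exchange_groups trades valid_groups out) := by unfold Spec_get_active_exchange_groups; infer_instance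

-- ===== CLAIM (what is proved, stated in full; the proofs are below) =====
def Claim_equal_get_active_exchange_groups : Prop := ∀ (trades : List (List (String × Int))) (valid_groups : List Int), Dom_get_active_exchange_groups trades valid_groups → Spec_get_active_exchange_groups trades valid_groups (get_active_exchange_groups trades valid_groups)

-- ===== LEMMAS AND PROOFS =====

-- A's loop body, over the already-extracted id
def pvStep (p : Int → Bool) (acc : List Int) (x : Int) : List Int :=
  if p x then PySem.Set.add acc x else acc

lemma update_ofList (t b : List Int) :
    PySem.Set.update t (PySem.Set.ofList b) = PySem.Set.update t b := by
  rw [PySem.Set.update_eq_append_filter, PySem.Set.update_eq_append_filter, PySem.Set.ofList_ofList]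

lemma update_filter (t : List Int) (xs : List Int) (q : Int → Bool)
    (h : ∀ x ∈ xs, q x = false → x ∈ t) :
    PySem.Set.update t (xs.filter q) = PySem.Set.update t xs := by
  induction xs generalizing t with
  | nil => rfl
  | cons x xs ih =>
    by_cases hq : q x = true
    · rw [List.filter_cons_of_pos hq, PySem.Set.update_cons, PySem.Set.update_cons]
      exact ih _ (fun y hy hqy => (PySem.Set.mem_add _ _ _).mpr (Or.inl (h y (List.mem_cons_of_mem _ hy) hqy)))
    · have hx : x ∈ t := h x List.mem_cons_self (Bool.eq_false_iff.mpr hq)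
      rw [List.filter_cons_of_neg (by simpa using hq), PySem.Set.update_cons,
          PySem.Set.add_of_mem hx]
      exact ih _ (fun y hy hqy => h y (List.mem_cons_of_mem _ hy) hqy)

lemma update_update (s a b : List Int) :
    PySem.Set.update s (PySem.Set.update a b) = PySem.Set.update (PySem.Set.update s a) b := by
  rw [PySem.Set.update_eq_append_filter a b, PySem.Set.update_append, update_filter, update_ofList]
  intro x hx hq
  have hmem : x ∈ a := by simpa using hq
  exact (PySem.Set.mem_update _ _ _).mpr (Or.inr hmem)

-- folding A's step from accumulator acc = update acc (fold from empty)
lemma foldl_step_eq_update (p : Int → Bool) (l : List Int) (acc : List Int) :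
    l.foldl (pvStep p) acc = PySem.Set.update acc (l.foldl (pvStep p) []) := by
  induction l generalizing acc with
  | nil => rfl
  | cons x l ih =>
    simp only [List.foldl_cons]
    by_cases hp : p x = true
    · have hstep : pvStep p acc x = PySem.Set.add acc x := by simp [pvStep, hp]
      have hstep0 : pvStep p ([] : List Int) x = [x] := by simp [pvStep, hp, PySem.Set.add]
      rw [hstep, hstep0, ih, ih [x], update_update, PySem.Set.update_cons, PySem.Set.update_nil]
    · have hstep : pvStep p acc x = acc := by simp [pvStep, hp]
      have hstep0 : pvStep p ([] : List Int) x = [] := by simp [pvStep, hp]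
      rw [hstep, hstep0, ih]

-- the divide-and-conquer recursion computes exactly A's left fold over the extracted ids
lemma pvGo_eq_foldl (valid_groups : List Int) (ts : List (List (String × Int))) :
    pvGo (PySem.Set.ofList valid_groups) ts
      = (ts.map pvExtract).foldl (pvStep (fun x => valid_groups.contains x)) [] := by
  have hc : ∀ y : Int, PySem.Set.contains (PySem.Set.ofList valid_groups) y
      = valid_groups.contains y := by
    intro y
    rw [Bool.eq_iff_iff]
    simp [PySem.Set.mem_ofList]
  induction ts using pvGo.induct (valid := PySem.Set.ofList valid_groups) with
  | case1 _ _ => rw [pvGo]; rfl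
  | case2 t tail hlen _ _ _ =>
    have htail : tail = [] := by
      cases tail with
      | nil => rfl
      | cons _ _ => simp at hlen
    subst htail
    rw [pvGo]
    simp only [List.length_cons, List.length_nil, Nat.le_refl, dite_true, List.map_cons,
      List.map_nil, List.foldl_cons, List.foldl_nil]
    rw [hc]
    rfl
  | case3 t tail hlen _ _ _ =>
    have htail : tail = [] := by
      cases tail with
      | nil => rfl
      | cons _ _ => simp at hlen
    subst htail
    rw [pvGo]
    simp only [List.length_cons, List.length_nil, Nat.le_refl, dite_true, List.map_cons,
      List.map_nil, List.foldl_cons, List.foldl_nil]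
    rw [hc]
    rfl
  | case4 ts0 hlen _ ih1 ih2 =>
    rw [pvGo]
    rw [dif_neg hlen]
    simp only [PySem.Set.union]
    rw [ih1, ih2, ← foldl_step_eq_update, ← List.foldl_append, ← List.map_append,
        List.take_append_drop]

-- ===== VERDICT (by name: the statement is the Claim_ definition above) =====
theorem get_active_exchange_groups_spec : Claim_equal_get_active_exchange_groups := by
  intro trades valid_groups _
  show get_active_exchange_groups trades valid_groups
      = get_active_exchange_groups_alt trades valid_groups
  unfold get_active_exchange_groups get_active_exchange_groups_alt
  rw [pvGo_eq_foldl, List.foldl_map]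
  rfl
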